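-- pv_equiv track=rewrite | github.com/millanense77/Criptografia | AES.py | arrayToMat
-- ===== SOURCE A (Python) =====
-- def arrayToMat(E):
--     """
--     Esta funcion convierte un bitarray en una matriz 4x4.
--     Recibe un bitarray.
--     Devuelve una matriz 4x4.
--     """
--     L = []
--     for i in range(0,128,8):
--         L.append(E[i:i+8])
--     R = []
--     for i in range(4):#Columnas
--         fila = []
--         for j in range(4):#Filas
--             fila.append(L[i+4*j])
--         R.append(fila)
--     return R
-- ===== SOURCE B (Python) =====
-- def arrayToMat(E):
--     # Single pass: scatter each bit directly into its cell of a pre-built 4x4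
--     # matrix of empty byte-lists; byte index b = k//8 lands at row b%4, col b//4.
--     R = [[[] for _ in range(4)] for _ in range(4)]
--     for k, bit in enumerate(E[:128]):
--         b = k // 8
--         R[b % 4][b // 4].append(bit)
--     return R
-- ===== Notes on version B (the rewrite author's own statement) =====
-- stated objective: alternative
-- what changed: A builds 16 byte-slices and then gathers them with a nested index loop (L[i+4*j]); B never builds the chunk list: it pre-builds a 4x4 matrix of empty cells and makes a single bit-level pass over E[:128], scattering each bit into row (k//8)%4, column (k//8)//4.
import Mathlib
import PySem

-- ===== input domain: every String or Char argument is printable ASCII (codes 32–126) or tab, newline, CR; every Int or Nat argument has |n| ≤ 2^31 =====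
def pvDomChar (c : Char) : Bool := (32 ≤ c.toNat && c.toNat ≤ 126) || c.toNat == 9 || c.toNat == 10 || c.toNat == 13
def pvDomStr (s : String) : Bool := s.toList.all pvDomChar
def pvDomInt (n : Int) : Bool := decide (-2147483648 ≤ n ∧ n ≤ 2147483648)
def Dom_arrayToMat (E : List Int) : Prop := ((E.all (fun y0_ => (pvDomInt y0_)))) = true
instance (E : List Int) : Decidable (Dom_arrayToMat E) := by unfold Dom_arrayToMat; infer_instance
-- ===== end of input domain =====

-- B replaces A's slice-into-16-chunks-then-gather with a single bit-level pass that
-- scatters each bit into a pre-built 4x4 matrix of empty cells (same cost; alternative decomposition).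
-- ===== PORT A =====
def arrayToMat (E : List Int) : List (List (List Int)) :=
  -- L = []; for i in range(0,128,8): L.append(E[i:i+8])
  let L := (PySem.List.pyRange 0 128 8).foldl
    (fun L i => L ++ [PySem.List.slice E (some i) (some (i+8))]) []
  -- R = []; for i in range(4): fila = []; for j in range(4): fila.append(L[i+4*j]); R.append(fila)
  (PySem.List.pyRange 0 4 1).foldl
    (fun R i =>
      let fila := (PySem.List.pyRange 0 4 1).foldl
        (fun fila j => fila ++ [PySem.List.pyGetD L (i + 4*j) []]) []
      R ++ [fila]) []

-- ===== PORT B =====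
def arrayToMat_alt (E : List Int) : List (List (List Int)) :=
  -- R = [[[] for _ in range(4)] for _ in range(4)]
  let R0 : List (List (List Int)) :=
    [[[], [], [], []], [[], [], [], []], [[], [], [], []], [[], [], [], []]]
  -- for k, bit in enumerate(E[:128]): b = k//8; R[b%4][b//4].append(bit)
  -- (enumerate indices are nonnegative, so .toNat of the Int index computations is exact)
  (PySem.List.enumerate (PySem.List.slice E none (some 128))).foldl
    (fun R kb =>
      let b := PySem.Int.floordiv kb.1 8
      R.modify (PySem.Int.mod b 4).toNat
        (fun row => row.modify (PySem.Int.floordiv b 4).toNat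
          (fun cell => cell ++ [kb.2]))) R0

-- ===== PRECONDITION & SPEC =====
def Spec_arrayToMat (E : List Int) (out : List (List (List Int))) : Prop := out = arrayToMat_alt E
instance (E : List Int) (out : List (List (List Int))) : Decidable (Spec_arrayToMat E out) := by unfold Spec_arrayToMat; infer_instance

-- ===== CLAIM (what is proved, stated in full; the proofs are below) =====
def Claim_equal_arrayToMat : Prop := ∀ (E : List Int), Dom_arrayToMat E → Spec_arrayToMat E (arrayToMat E)

-- ===== LEMMAS AND PROOFS =====

/-- byte-chunk `b` of a bit list -/
def pvCell (xs : List Int) (b : Nat) : List Int := (xs.drop (8*b)).take 8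

/-- the 4x4 column-major matrix of byte chunks -/
def pvMat (xs : List Int) : List (List (List Int)) :=
  [[pvCell xs 0, pvCell xs 4, pvCell xs 8, pvCell xs 12],
   [pvCell xs 1, pvCell xs 5, pvCell xs 9, pvCell xs 13],
   [pvCell xs 2, pvCell xs 6, pvCell xs 10, pvCell xs 14],
   [pvCell xs 3, pvCell xs 7, pvCell xs 11, pvCell xs 15]]

theorem pvMat_eq_map (xs : List Int) :
    pvMat xs = (List.range 4).map (fun i => (List.range 4).map (fun j => pvCell xs (i + 4*j))) := by
  simp [pvMat, List.range_succ]

theorem pvCell_append_lt (ys : List Int) (x : Int) (b : Nat) (h : ys.length < 8*b) :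
    pvCell (ys ++ [x]) b = pvCell ys b := by
  unfold pvCell
  rw [List.drop_eq_nil_of_le (by simp; omega), List.drop_eq_nil_of_le (by omega)]

theorem pvCell_append_ge (ys : List Int) (x : Int) (b : Nat) (h : 8*b + 8 ≤ ys.length) :
    pvCell (ys ++ [x]) b = pvCell ys b := by
  unfold pvCell
  rw [List.drop_append_of_le_length (by omega),
      List.take_append_of_le_length (by simp; omega)]

theorem pvCell_append_mid (ys : List Int) (x : Int) (b : Nat)
    (h1 : 8*b ≤ ys.length) (h2 : ys.length < 8*b + 8) :
    pvCell (ys ++ [x]) b = pvCell ys b ++ [x] := by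
  unfold pvCell
  rw [List.drop_append_of_le_length (by omega),
      List.take_of_length_le (by simp; omega),
      List.take_of_length_le (by simp; omega)]

theorem pvCell_append_of_ne (ys : List Int) (x : Int) (m b : Nat)
    (hb1 : 8*m ≤ ys.length) (hb2 : ys.length < 8*m + 8) (hne : b ≠ m) :
    pvCell (ys ++ [x]) b = pvCell ys b := by
  rcases Nat.lt_or_ge b m with h | h
  · exact pvCell_append_ge ys x b (by omega)
  · exact pvCell_append_lt ys x b (by omega)

theorem pvStep (ys : List Int) (x : Int) (m : Nat)
    (hb1 : 8*m ≤ ys.length) (hb2 : ys.length < 8*m + 8) :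
    ((pvMat ys).modify (m % 4) fun row =>
      row.modify (m / 4) fun cell => cell ++ [x]) = pvMat (ys ++ [x]) := by
  rw [pvMat_eq_map, pvMat_eq_map]
  apply List.ext_getElem?
  intro i
  rw [List.getElem?_modify]
  by_cases hi : i < 4
  · rw [List.getElem?_map, List.getElem?_map, List.getElem?_range hi]
    simp only [Option.map_some]
    refine congrArg some ?_
    beta_reduce
    by_cases hr : m % 4 = i
    · rw [if_pos hr]
      apply List.ext_getElem?
      intro j
      rw [List.getElem?_modify]
      by_cases hj : j < 4
      · rw [List.getElem?_map, List.getElem?_map, List.getElem?_range hj]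
        simp only [Option.map_some]
        refine congrArg some ?_
        beta_reduce
        by_cases hc : m / 4 = j
        · rw [if_pos hc]
          exact (pvCell_append_mid ys x (i + 4*j) (by omega) (by omega)).symm
        · rw [if_neg hc]
          exact (pvCell_append_of_ne ys x m (i + 4*j) hb1 hb2 (by omega)).symm
      · rw [List.getElem?_eq_none (by simpa using by omega),
            List.getElem?_eq_none (by simpa using by omega)]
        simp
    · rw [if_neg hr]
      apply List.map_congr_left
      intro j hj
      simp only [List.mem_range] at hj
      exact (pvCell_append_of_ne ys x m (i + 4*j) hb1 hb2 (by omega)).symm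
  · rw [List.getElem?_eq_none (by simpa using by omega),
        List.getElem?_eq_none (by simpa using by omega)]
    simp

theorem pvFold_eq_pvMat (xs : List Int) (h : xs.length ≤ 128) :
    (PySem.List.enumerate xs).foldl
      (fun R kb =>
        let b := PySem.Int.floordiv kb.1 8
        R.modify (PySem.Int.mod b 4).toNat
          (fun row => row.modify (PySem.Int.floordiv b 4).toNat
            (fun cell => cell ++ [kb.2])))
      [[[], [], [], []], [[], [], [], []], [[], [], [], []], [[], [], [], []]]
    = pvMat xs := by
  induction xs using List.reverseRecOn with
  | nil => simp [pvMat, pvCell]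
  | append_singleton ys x IH =>
    have hn : ys.length + 1 ≤ 128 := by simpa using h
    rw [PySem.List.enumerate_append, List.foldl_append, IH (by omega)]
    simp only [PySem.List.enumerate_cons, PySem.List.enumerate_nil, List.foldl_cons,
      List.foldl_nil]
    have hfd : PySem.Int.floordiv ((0:Int) + (ys.length : Int)) 8 = ((ys.length / 8 : Nat) : Int) := by
      rw [zero_add]; exact PySem.Int.floordiv_natCast _ _
    have hmod : PySem.Int.mod ((ys.length / 8 : Nat) : Int) 4 = ((ys.length / 8 % 4 : Nat) : Int) := by
      exact_mod_cast PySem.Int.mod_natCast (ys.length / 8) 4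
    have hfd2 : PySem.Int.floordiv ((ys.length / 8 : Nat) : Int) 4 = ((ys.length / 8 / 4 : Nat) : Int) := by
      exact_mod_cast PySem.Int.floordiv_natCast (ys.length / 8) 4
    rw [hfd, hmod, hfd2, Int.toNat_natCast, Int.toNat_natCast]
    exact pvStep ys x (ys.length / 8) (by omega) (by omega)

theorem pvCell_take (E : List Int) (b : Nat) (h : 8*b + 8 ≤ 128) :
    pvCell (E.take 128) b = (E.drop (8*b)).take 8 := by
  unfold pvCell
  rw [List.drop_take, List.take_take]
  congr 1
  omega

-- ===== VERDICT (by name: the statement is the Claim_ definition above) =====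
theorem arrayToMat_spec : Claim_equal_arrayToMat := by
  intro E _
  unfold Spec_arrayToMat
  have hB : arrayToMat_alt E = pvMat (E.take 128) := by
    unfold arrayToMat_alt
    rw [show PySem.List.slice E none (some 128) = E.take 128 from by
      simpa using PySem.List.slice_to E (b := 128) (by norm_num)]
    exact pvFold_eq_pvMat _ (by simp)
  rw [hB]
  unfold arrayToMat
  rw [show PySem.List.pyRange 0 128 8 = [0,8,16,24,32,40,48,56,64,72,80,88,96,104,112,120] from by decide,
      show PySem.List.pyRange 0 4 1 = [0,1,2,3] from by decide]
  simp only [List.foldl_cons, List.foldl_nil, Int.reduceAdd, Int.reduceMul]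
  simp [PySem.List.slice_toNat, PySem.List.pyGetD, PySem.List.pyGet?, PySem.List.pyIdx?,
    pvMat, pvCell_take]
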